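-- pv_equiv track=rewrite | github.com/rmfulton/BenjaminProblem | solution.py | get_all_pairs_that_multiply_to_p
-- ===== SOURCE A (Python) =====
-- def get_all_pairs_that_multiply_to_p(pairs):
--     allPairsThatMultiplyToP = dict()
--     for pair in pairs:
--         product = pair[0]*pair[1]
--         if product not in allPairsThatMultiplyToP:
--             allPairsThatMultiplyToP[product] = []
--         allPairsThatMultiplyToP[product].append(pair)
--     return allPairsThatMultiplyToP
-- ===== SOURCE B (Python) =====
-- def get_all_pairs_that_multiply_to_p(pairs):
--     # Collect the distinct products in order of first appearance, then build
--     # each bucket with a single filter pass per product.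
--     products = []
--     for pair in pairs:
--         q = pair[0] * pair[1]
--         if q not in products:
--             products.append(q)
--     return {q: [pair for pair in pairs if pair[0] * pair[1] == q] for q in products}
-- ===== Notes on version B (the rewrite author's own statement) =====
-- stated objective: alternative
-- what changed: A builds the dict in one pass appending each pair to its product's bucket; B first deduplicates the products in first-occurrence order and then builds each bucket by filtering the input once per distinct product.
import Mathlib
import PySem

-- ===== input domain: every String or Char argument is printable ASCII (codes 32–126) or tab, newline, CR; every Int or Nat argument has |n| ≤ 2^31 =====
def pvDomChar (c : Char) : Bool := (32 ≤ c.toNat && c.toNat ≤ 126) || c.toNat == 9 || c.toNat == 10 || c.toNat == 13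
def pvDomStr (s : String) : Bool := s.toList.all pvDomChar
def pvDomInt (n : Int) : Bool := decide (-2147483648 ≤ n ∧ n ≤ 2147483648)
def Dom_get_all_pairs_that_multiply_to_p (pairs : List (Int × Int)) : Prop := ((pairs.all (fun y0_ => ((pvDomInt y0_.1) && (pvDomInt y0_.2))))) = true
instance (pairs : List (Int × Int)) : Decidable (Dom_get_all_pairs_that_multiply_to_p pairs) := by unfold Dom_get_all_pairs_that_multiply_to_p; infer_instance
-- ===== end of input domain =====

-- B groups by deduplicating products first and filtering per product instead of A's single hash-append pass; alternative decomposition, not claimed faster.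

-- ===== PORT A =====
-- one loop step of A: 'if product not in d: d[product] = []' then 'd[product].append(pair)'
def pvStepA (d : PySem.Dict Int (List (Int × Int))) (pair : Int × Int) : PySem.Dict Int (List (Int × Int)) :=
  let product := pair.1 * pair.2
  let d' := if d.contains product = false then d.insert product [] else d
  d'.modify product [] (fun l => l ++ [pair])

def get_all_pairs_that_multiply_to_p (pairs : List (Int × Int)) : List (Int × List (Int × Int)) :=
  (pairs.foldl pvStepA PySem.Dict.empty).items

-- ===== PORT B =====
def get_all_pairs_that_multiply_to_p_alt (pairs : List (Int × Int)) : List (Int × List (Int × Int)) :=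
  let products : PySem.Set Int := PySem.Set.ofList (pairs.map (fun pair => pair.1 * pair.2))
  products.map (fun q => (q, pairs.filter (fun pair => pair.1 * pair.2 == q)))

-- ===== PRECONDITION & SPEC =====
def Spec_get_all_pairs_that_multiply_to_p (pairs : List (Int × Int)) (out : List (Int × List (Int × Int))) : Prop := out = get_all_pairs_that_multiply_to_p_alt pairs
instance (pairs : List (Int × Int)) (out : List (Int × List (Int × Int))) : Decidable (Spec_get_all_pairs_that_multiply_to_p pairs out) := by unfold Spec_get_all_pairs_that_multiply_to_p; infer_instance

-- ===== CLAIM (what is proved, stated in full; the proofs are below) =====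
def Claim_equal_get_all_pairs_that_multiply_to_p : Prop := ∀ (pairs : List (Int × Int)), Dom_get_all_pairs_that_multiply_to_p pairs → Spec_get_all_pairs_that_multiply_to_p pairs (get_all_pairs_that_multiply_to_p pairs)

-- ===== LEMMAS AND PROOFS =====

theorem pvStepA_pre_getD (d : PySem.Dict Int (List (Int × Int))) (q : Int) (x : Int) :
    ((if d.contains q = false then d.insert q [] else d).getD x []) = d.getD x [] := by
  by_cases h : d.contains q = true
  · simp [h]
  · have hf : d.contains q = false := by simpa using h
    simp only [hf, if_true]
    rw [PySem.Dict.getD_insert]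
    split_ifs with hx
    · subst hx; exact (PySem.Dict.getD_of_not_contains d _ hf).symm
    · rfl

theorem pvStepA_keys (d : PySem.Dict Int (List (Int × Int))) (pair : Int × Int) :
    (pvStepA d pair).keys = PySem.Set.add d.keys (pair.1 * pair.2) := by
  unfold pvStepA PySem.Set.add
  rw [PySem.Dict.keys_modify]
  by_cases h : d.contains (pair.1 * pair.2) = true
  · have hmem : PySem.Set.contains d.keys (pair.1 * pair.2) = true := by
      show List.contains d.keys (pair.1 * pair.2) = true
      rw [List.contains_iff_mem]
      exact (PySem.Dict.contains_iff_mem_keys d _).mp h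
    rw [if_neg (by simp [h]), hmem, if_pos rfl]
    exact PySem.Dict.keys_insert_of_contains d _ h
  · have hf : d.contains (pair.1 * pair.2) = false := by simpa using h
    have hmem : PySem.Set.contains d.keys (pair.1 * pair.2) = false := by
      show List.contains d.keys (pair.1 * pair.2) = false
      rw [Bool.eq_false_iff]
      intro hc
      rw [List.contains_iff_mem] at hc
      exact h ((PySem.Dict.contains_iff_mem_keys d _).mpr hc)
    rw [if_pos hf, hmem, if_neg (by simp)]
    rw [PySem.Dict.keys_insert_of_contains _ _ (by rw [PySem.Dict.contains_insert]; simp),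
        PySem.Dict.keys_insert_of_not_contains d _ hf]

theorem pvStepA_getD (d : PySem.Dict Int (List (Int × Int))) (pair : Int × Int) (c : Int) :
    (pvStepA d pair).getD c [] =
      if c = pair.1 * pair.2 then d.getD c [] ++ [pair] else d.getD c [] := by
  unfold pvStepA
  rw [PySem.Dict.getD_modify, pvStepA_pre_getD, pvStepA_pre_getD]
  split_ifs with hc
  · subst hc; rfl
  · rfl

theorem foldA_keys (l : List (Int × Int)) (d : PySem.Dict Int (List (Int × Int))) :
    (l.foldl pvStepA d).keys = PySem.Set.update d.keys (l.map (fun pair => pair.1 * pair.2)) := by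
  induction l generalizing d with
  | nil => simp [PySem.Set.update]
  | cons p l ih =>
      simp only [List.foldl_cons, List.map_cons]
      rw [ih, PySem.Set.update_cons, pvStepA_keys]

theorem foldA_getD (l : List (Int × Int)) (d : PySem.Dict Int (List (Int × Int))) (c : Int) :
    (l.foldl pvStepA d).getD c [] = d.getD c [] ++ l.filter (fun pair => pair.1 * pair.2 == c) := by
  induction l generalizing d with
  | nil => simp
  | cons p l ih =>
      simp only [List.foldl_cons, List.filter_cons]
      rw [ih, pvStepA_getD]
      by_cases hc : c = p.1 * p.2
      · subst hc
        rw [if_pos rfl, if_pos (beq_self_eq_true _), List.append_assoc, List.singleton_append]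
      · have hne : (p.1 * p.2 == c) = false := by
          rw [beq_eq_false_iff_ne]
          exact fun h => hc h.symm
        rw [if_neg hc, hne, if_neg (by simp)]

theorem foldA_keys_nodup (l : List (Int × Int)) :
    (l.foldl pvStepA PySem.Dict.empty).keys.Nodup := by
  rw [foldA_keys, PySem.Dict.keys_empty, PySem.Set.update_nil_left]
  exact PySem.Set.nodup_ofList _

-- ===== VERDICT (by name: the statement is the Claim_ definition above) =====
theorem get_all_pairs_that_multiply_to_p_spec : Claim_equal_get_all_pairs_that_multiply_to_p := by
  intro pairs _
  show get_all_pairs_that_multiply_to_p pairs = get_all_pairs_that_multiply_to_p_alt pairs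
  unfold get_all_pairs_that_multiply_to_p get_all_pairs_that_multiply_to_p_alt
  rw [PySem.Dict.items_eq_map_keys _ (foldA_keys_nodup pairs) []]
  rw [foldA_keys, PySem.Dict.keys_empty, PySem.Set.update_nil_left]
  apply List.map_congr_left
  intro q _
  rw [foldA_getD, PySem.Dict.getD_empty, List.nil_append]
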